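-- pv_equiv track=rewrite | github.com/DimopDim/PhD | 16_ISTH_Conference/andromeda/compare_mimic_vs_eicu_table1.py | build_selected_columns
-- ===== SOURCE A (Python) =====
-- from typing import Dict, List, Tuple
--
-- TARGET_COL = "hospital_expire_flag"  # 0=survive, 1=die
--
-- SUMMARY_SUFFIXES = ["_(Median)", "_(Mean)", "_(Min)", "_(Max)"]
--
-- SUMMARY_PREF_FALLBACK = ["_(Median)", "_(Mean)", "_(Min)", "_(Max)"]
--
-- def _is_summary_col(c: str) -> bool:
--     return any(c.endswith(suf) for suf in SUMMARY_SUFFIXES)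
--
-- def _base_name(c: str) -> str:
--     for suf in SUMMARY_SUFFIXES:
--         if c.endswith(suf):
--             return c[: -len(suf)]
--     return c
--
-- def build_selected_columns(
--     common_cols: List[str],
--     summary: str = "Median",
--     keep_all_summaries: bool = False,
--     include_demographics: bool = True,
-- ) -> List[str]:
--     summary = summary.strip().lower()
--     want = {
--         "median": "_(Median)",
--         "mean": "_(Mean)",
--         "min": "_(Min)",
--         "max": "_(Max)",
--     }.get(summary, "_(Median)")
--
--     exclude_like = {
--         "row_count", "hadm_id", "stay_id", "icu_intime", "icu_outtime", "hosp_dischtime", "dod",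
--         "subject_id", "Time_Zone",
--         TARGET_COL,
--     }
--
--     demographics = ["gender", "sex", "age", "race", "ethnicity", "BMI", "bmi", "sofa", "SOFA", "los", "LOS"]
--
--     common_cols = [c for c in common_cols if c not in exclude_like]
--     unsuffixed = [c for c in common_cols if not _is_summary_col(c)]
--
--     if include_demographics:
--         demo_keep = []
--         demo_set = set(demographics)
--         for c in unsuffixed:
--             if c in demo_set:
--                 demo_keep.append(c)
--         base_keep = [c for c in unsuffixed if c not in set(demo_keep)]
--         unsuffixed_keep = demo_keep + base_keep
--     else:
--         unsuffixed_keep = unsuffixed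
--
--     summary_cols = [c for c in common_cols if _is_summary_col(c)]
--     if keep_all_summaries:
--         chosen_summary_cols = summary_cols
--     else:
--         by_base: Dict[str, List[str]] = {}
--         for c in summary_cols:
--             by_base.setdefault(_base_name(c), []).append(c)
--
--         chosen_summary_cols = []
--         for base, cols in by_base.items():
--             cols_set = set(cols)
--             if base + want in cols_set:
--                 chosen_summary_cols.append(base + want)
--             else:
--                 picked = None
--                 for suf in SUMMARY_PREF_FALLBACK:
--                     if base + suf in cols_set:
--                         picked = base + suf
--                         break
--                 if picked is not None:
--                     chosen_summary_cols.append(picked)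
--
--         chosen_summary_cols = sorted(chosen_summary_cols)
--
--     seen = set()
--     out = []
--     for c in unsuffixed_keep + chosen_summary_cols:
--         if c not in seen:
--             seen.add(c)
--             out.append(c)
--     return out
-- ===== SOURCE B (Python) =====
-- from typing import List
--
-- TARGET_COL = "hospital_expire_flag"
-- SUMMARY_SUFFIXES = ["_(Median)", "_(Mean)", "_(Min)", "_(Max)"]
-- SUMMARY_PREF_FALLBACK = ["_(Median)", "_(Mean)", "_(Min)", "_(Max)"]
--
-- _WANT = {"median": "_(Median)", "mean": "_(Mean)", "min": "_(Min)", "max": "_(Max)"}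
--
-- _EXCLUDE = {"row_count", "hadm_id", "stay_id", "icu_intime", "icu_outtime",
--             "hosp_dischtime", "dod", "subject_id", "Time_Zone", TARGET_COL}
--
-- _DEMOGRAPHICS = ["gender", "sex", "age", "race", "ethnicity", "BMI", "bmi", "sofa", "SOFA", "los", "LOS"]
--
--
-- def build_selected_columns(
--     common_cols: List[str],
--     summary: str = "Median",
--     keep_all_summaries: bool = False,
--     include_demographics: bool = True,
-- ) -> List[str]:
--     want = _WANT.get(summary.strip().lower(), "_(Median)")
--
--     kept = [c for c in common_cols if c not in _EXCLUDE]
--     plain = [c for c in kept if not any(c.endswith(s) for s in SUMMARY_SUFFIXES)]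
--     summ = [c for c in kept if any(c.endswith(s) for s in SUMMARY_SUFFIXES)]
--
--     if include_demographics:
--         front = [c for c in plain if c in _DEMOGRAPHICS] + \
--                 [c for c in plain if c not in _DEMOGRAPHICS]
--     else:
--         front = plain
--
--     if keep_all_summaries:
--         chosen = summ
--     else:
--         # priority rounds instead of grouping by base: the wanted suffix first, then the
--         # fallback order; each round claims every still-uncovered base that has a column
--         # with that round's suffix (no per-base dict of candidate lists is ever built)
--         covered = set()
--         chosen = []
--         for suf in [want] + SUMMARY_PREF_FALLBACK:
--             for c in summ:
--                 if c.endswith(suf):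
--                     base = c[: -len(suf)]
--                     if base not in covered:
--                         covered.add(base)
--                         chosen.append(c)
--         chosen.sort()
--
--     return list(dict.fromkeys(front + chosen))
-- ===== Notes on version B (the rewrite author's own statement) =====
-- stated objective: alternative
-- what changed: Summary selection no longer groups columns by base into a dict of candidate lists probed want-then-fallback per base: B instead makes priority ROUNDS - one scan of the summary columns per suffix in [want]+fallback order with a covered-bases set, each round claiming every still-uncovered base that has that suffix - then sorts; the final dedup becomes dict.fromkeys.
import Mathlib
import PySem

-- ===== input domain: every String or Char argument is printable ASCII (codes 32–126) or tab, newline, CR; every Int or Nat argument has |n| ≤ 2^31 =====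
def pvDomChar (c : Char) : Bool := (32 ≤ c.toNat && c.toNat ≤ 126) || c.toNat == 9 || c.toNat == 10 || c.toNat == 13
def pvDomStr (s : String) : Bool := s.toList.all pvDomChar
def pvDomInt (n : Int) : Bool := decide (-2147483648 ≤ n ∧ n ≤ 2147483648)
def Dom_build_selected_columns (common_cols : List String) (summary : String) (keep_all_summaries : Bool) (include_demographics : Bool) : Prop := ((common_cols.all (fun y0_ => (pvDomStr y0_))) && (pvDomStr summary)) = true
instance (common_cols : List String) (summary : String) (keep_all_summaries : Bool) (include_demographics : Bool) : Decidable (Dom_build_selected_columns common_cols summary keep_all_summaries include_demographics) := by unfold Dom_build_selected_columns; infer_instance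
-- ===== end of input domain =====

-- B replaces A's group-columns-by-base-then-probe selection by priority ROUNDS: one pass per
-- suffix in preference order claims every still-uncovered base (no per-base dict of lists);
-- objective: alternative decomposition of the same selection (same cost).

-- ===== PORT A =====
-- Python str '+' ported by hand as code-point list append (exact).
def pvConcat (a b : String) : String := String.ofList (a.toList ++ b.toList)

def pvSummarySuffixes : List String := ["_(Median)", "_(Mean)", "_(Min)", "_(Max)"]

def pvSummaryPrefFallback : List String := ["_(Median)", "_(Mean)", "_(Min)", "_(Max)"]

def pvExcludeLike : PySem.Set String :=
  PySem.Set.ofList ["row_count", "hadm_id", "stay_id", "icu_intime", "icu_outtime",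
    "hosp_dischtime", "dod", "subject_id", "Time_Zone", "hospital_expire_flag"]

def pvDemographics : List String :=
  ["gender", "sex", "age", "race", "ethnicity", "BMI", "bmi", "sofa", "SOFA", "los", "LOS"]

-- _is_summary_col
def pvIsSummaryCol (c : String) : Bool := pvSummarySuffixes.any (fun suf => PySem.Str.endswith c suf)

-- _base_name: the for-loop with early return, as structural recursion over the suffix list
def pvBaseNameGo (sufs : List String) (c : String) : String :=
  match sufs with
  | [] => c
  | suf :: rest =>
    if PySem.Str.endswith c suf then PySem.Str.slice c none (some (-(PySem.Str.len suf : Int)))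
    else pvBaseNameGo rest c

def pvBaseName (c : String) : String := pvBaseNameGo pvSummarySuffixes c

def build_selected_columns (common_cols : List String) (summary : String) (keep_all_summaries : Bool) (include_demographics : Bool) : List String :=
  let summary1 := PySem.Str.lower (PySem.Str.strip summary)
  let want := PySem.Dict.getD (PySem.Dict.ofList
      [("median", "_(Median)"), ("mean", "_(Mean)"), ("min", "_(Min)"), ("max", "_(Max)")])
      summary1 "_(Median)"
  let common := common_cols.filter (fun c => !(PySem.Set.contains pvExcludeLike c))
  let unsuffixed := common.filter (fun c => !(pvIsSummaryCol c))
  let unsuffixed_keep :=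
    if include_demographics then
      let demo_set := PySem.Set.ofList pvDemographics
      let demo_keep := unsuffixed.foldl
        (fun acc c => if PySem.Set.contains demo_set c then acc ++ [c] else acc) []
      let base_keep := unsuffixed.filter
        (fun c => !(PySem.Set.contains (PySem.Set.ofList demo_keep) c))
      demo_keep ++ base_keep
    else unsuffixed
  let summary_cols := common.filter (fun c => pvIsSummaryCol c)
  let chosen_summary_cols :=
    if keep_all_summaries then summary_cols
    else
      -- by_base.setdefault(_base_name(c), []).append(c): re-store the list with c appended
      let by_base := summary_cols.foldl
        (fun d c => PySem.Dict.insert d (pvBaseName c) (PySem.Dict.getD d (pvBaseName c) [] ++ [c]))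
        PySem.Dict.empty
      let chosen0 := (PySem.Dict.items by_base).foldl
        (fun acc p =>
          let cols_set := PySem.Set.ofList p.2
          if PySem.Set.contains cols_set (pvConcat p.1 want) then acc ++ [pvConcat p.1 want]
          else
            -- picked = None; for suf in SUMMARY_PREF_FALLBACK: … break
            match pvSummaryPrefFallback.find? (fun suf => PySem.Set.contains cols_set (pvConcat p.1 suf)) with
            | some suf => acc ++ [pvConcat p.1 suf]
            | none => acc) []
      PySem.List.sorted chosen0 (fun x => x) false
  (((unsuffixed_keep ++ chosen_summary_cols).foldl
      (fun (st : PySem.Set String × List String) c =>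
        if PySem.Set.contains st.1 c then st else (PySem.Set.add st.1 c, st.2 ++ [c]))
      (PySem.Set.empty, [])).2)

-- ===== PORT B =====
def build_selected_columns_alt (common_cols : List String) (summary : String) (keep_all_summaries : Bool) (include_demographics : Bool) : List String :=
  let want := PySem.Dict.getD (PySem.Dict.ofList
      [("median", "_(Median)"), ("mean", "_(Mean)"), ("min", "_(Min)"), ("max", "_(Max)")])
      (PySem.Str.lower (PySem.Str.strip summary)) "_(Median)"
  let kept := common_cols.filter (fun c => !(PySem.Set.contains pvExcludeLike c))
  let plain := kept.filter (fun c => !(pvSummarySuffixes.any (fun s => PySem.Str.endswith c s)))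
  let summ := kept.filter (fun c => pvSummarySuffixes.any (fun s => PySem.Str.endswith c s))
  let front :=
    if include_demographics then
      plain.filter (fun c => pvDemographics.contains c)
        ++ plain.filter (fun c => !(pvDemographics.contains c))
    else plain
  let chosen :=
    if keep_all_summaries then summ
    else
      -- priority rounds over (want :: fallback): each round claims every still-uncovered base
      let st := (want :: pvSummaryPrefFallback).foldl
        (fun (st : PySem.Set String × List String) suf =>
          summ.foldl
            (fun (st : PySem.Set String × List String) c =>
              if PySem.Str.endswith c suf then
                let base := PySem.Str.slice c none (some (-(PySem.Str.len suf : Int)))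
                if PySem.Set.contains st.1 base then st
                else (PySem.Set.add st.1 base, st.2 ++ [c])
              else st) st)
        (PySem.Set.empty, [])
      PySem.List.sorted st.2 (fun x => x) false
  PySem.List.dedup (front ++ chosen)

-- ===== PRECONDITION & SPEC =====
def Spec_build_selected_columns (common_cols : List String) (summary : String) (keep_all_summaries : Bool) (include_demographics : Bool) (out : List String) : Prop := out = build_selected_columns_alt common_cols summary keep_all_summaries include_demographics
instance (common_cols : List String) (summary : String) (keep_all_summaries : Bool) (include_demographics : Bool) (out : List String) : Decidable (Spec_build_selected_columns common_cols summary keep_all_summaries include_demographics out) := by unfold Spec_build_selected_columns; infer_instance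

-- ===== CLAIM (what is proved, stated in full; the proofs are below) =====
def Claim_equal_build_selected_columns : Prop := ∀ (common_cols : List String) (summary : String) (keep_all_summaries : Bool) (include_demographics : Bool), Dom_build_selected_columns common_cols summary keep_all_summaries include_demographics → Spec_build_selected_columns common_cols summary keep_all_summaries include_demographics (build_selected_columns common_cols summary keep_all_summaries include_demographics)

-- ===== LEMMAS AND PROOFS =====

-- proof-side helpers
def pvSl (suf c : String) : String := PySem.Str.slice c none (some (-(PySem.Str.len suf : Int)))

def pvSuffixOf (c : String) : Option String :=
  pvSummarySuffixes.find? (fun suf => PySem.Str.endswith c suf)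

def pvBaseOf (c : String) : String :=
  match pvSuffixOf c with
  | some suf => pvSl suf c
  | none => c

def pvPick (base : String) (prefs : List String) (pool : PySem.Set String) : Option String :=
  match prefs.find? (fun s => PySem.Set.contains pool (pvConcat base s)) with
  | some s => some (pvConcat base s)
  | none => none

theorem pvBaseName_eq_baseOf (c : String) : pvBaseName c = pvBaseOf c := by
  simp only [pvBaseName, pvBaseOf, pvSuffixOf, pvSl, pvSummarySuffixes, pvBaseNameGo, List.find?]
  split_ifs <;> simp_all

theorem toList_pvConcat (a b : String) : (pvConcat a b).toList = a.toList ++ b.toList := by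
  simp [pvConcat]

theorem endswith_iff_suffix (c s : String) :
    PySem.Str.endswith c s = true ↔ s.toList <:+ c.toList := by
  rw [show PySem.Str.endswith c s = PySem.Chars.endswith c.toList s.toList from by simp]
  exact PySem.Chars.endswith_iff _ _

theorem endswith_concat (b s : String) : PySem.Str.endswith (pvConcat b s) s = true := by
  rw [endswith_iff_suffix, toList_pvConcat]
  exact List.suffix_append _ _

theorem slice_concat (b s : String) (h : 0 < s.toList.length) :
    pvSl s (pvConcat b s) = b := by
  apply String.toList_inj.mp
  unfold pvSl
  rw [show (PySem.Str.len s : Int) = ((s.toList.length : Nat) : Int) from by simp [PySem.Str.len_eq]]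
  rw [show (PySem.Str.slice (pvConcat b s) none (some (-(s.toList.length : Int)))).toList
      = PySem.List.slice (pvConcat b s).toList none (some (-(s.toList.length : Int))) from by simp]
  rw [PySem.List.slice_to_neg_natCast _ _ h]
  simp [pvConcat]

theorem endswith_unique (c s s' : String) (hs : s ∈ pvSummarySuffixes) (hs' : s' ∈ pvSummarySuffixes)
    (h : PySem.Str.endswith c s = true) (h' : PySem.Str.endswith c s' = true) : s = s' := by
  rw [endswith_iff_suffix] at h h'
  rcases List.suffix_or_suffix_of_suffix h h' with hss | hss <;>
    (fin_cases hs <;> fin_cases hs' <;> first | rfl | (exfalso; revert hss; decide))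

theorem suffixOf_of_endswith (c s : String) (hs : s ∈ pvSummarySuffixes)
    (h : PySem.Str.endswith c s = true) : pvSuffixOf c = some s := by
  cases hfind : pvSuffixOf c with
  | none =>
    exfalso
    have hb : PySem.Chars.endswith c.toList s.toList = true := by simpa using h
    have := List.find?_eq_none.mp hfind s hs
    simp [hb] at this
  | some s0 =>
    have h0 : PySem.Str.endswith c s0 = true := List.find?_some hfind
    have hm0 : s0 ∈ pvSummarySuffixes := List.mem_of_find?_eq_some hfind
    rw [endswith_unique c s0 s hm0 hs h0 h]

theorem baseOf_of_endswith (c s : String) (hs : s ∈ pvSummarySuffixes)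
    (h : PySem.Str.endswith c s = true) : pvBaseOf c = pvSl s c := by
  unfold pvBaseOf
  rw [suffixOf_of_endswith c s hs h]

theorem concat_sl (c s : String) (hpos : 0 < s.toList.length)
    (h : PySem.Str.endswith c s = true) : pvConcat (pvSl s c) s = c := by
  rw [endswith_iff_suffix] at h
  obtain ⟨t, ht⟩ := h
  apply String.toList_inj.mp
  rw [toList_pvConcat]
  unfold pvSl
  rw [show (PySem.Str.len s : Int) = ((s.toList.length : Nat) : Int) from by simp [PySem.Str.len_eq]]
  rw [show (PySem.Str.slice c none (some (-(s.toList.length : Int)))).toList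
      = PySem.List.slice c.toList none (some (-(s.toList.length : Int))) from by simp]
  rw [PySem.List.slice_to_neg_natCast _ _ hpos]
  rw [← ht]
  simp

theorem suffix_len_pos (s : String) (hs : s ∈ pvSummarySuffixes) : 0 < s.toList.length := by
  fin_cases hs <;> decide

theorem suffixOf_concat (b s : String) (hs : s ∈ pvSummarySuffixes) :
    pvSuffixOf (pvConcat b s) = some s :=
  suffixOf_of_endswith _ s hs (endswith_concat b s)

theorem baseOf_concat (b s : String) (hs : s ∈ pvSummarySuffixes) : pvBaseOf (pvConcat b s) = b := by
  unfold pvBaseOf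
  rw [suffixOf_concat b s hs]
  exact slice_concat b s (suffix_len_pos s hs)

theorem baseName_concat (b s : String) (hs : s ∈ pvSummarySuffixes) : pvBaseName (pvConcat b s) = b := by
  rw [pvBaseName_eq_baseOf]; exact baseOf_concat b s hs

theorem want_mem (s1 : String) :
    PySem.Dict.getD (PySem.Dict.ofList
      [("median", "_(Median)"), ("mean", "_(Mean)"), ("min", "_(Min)"), ("max", "_(Max)")])
      s1 "_(Median)" ∈ pvSummarySuffixes := by
  unfold pvSummarySuffixes
  by_cases h1 : s1 = "median"
  · subst h1; decide
  · by_cases h2 : s1 = "mean"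
    · subst h2; decide
    · by_cases h3 : s1 = "min"
      · subst h3; decide
      · by_cases h4 : s1 = "max"
        · subst h4; decide
        · simp only [PySem.Dict.getD, PySem.Dict.get?,
            show (PySem.Dict.ofList [("median", "_(Median)"), ("mean", "_(Mean)"), ("min", "_(Min)"), ("max", "_(Max)")]).items
              = [("median", "_(Median)"), ("mean", "_(Mean)"), ("min", "_(Min)"), ("max", "_(Max)")] from rfl]
          rw [List.find?_cons_of_neg (by simp [Ne.symm h1]),
              List.find?_cons_of_neg (by simp [Ne.symm h2]),
              List.find?_cons_of_neg (by simp [Ne.symm h3]),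
              List.find?_cons_of_neg (by simp [Ne.symm h4])]
          simp

theorem front_eq (u : List String) :
    (u.foldl (fun acc c =>
        if PySem.Set.contains (PySem.Set.ofList pvDemographics) c then acc ++ [c] else acc) [])
      ++ u.filter (fun c => !(PySem.Set.contains (PySem.Set.ofList
            (u.foldl (fun acc c =>
              if PySem.Set.contains (PySem.Set.ofList pvDemographics) c then acc ++ [c] else acc) [])) c))
    = u.filter (fun c => pvDemographics.contains c)
      ++ u.filter (fun c => !(pvDemographics.contains c)) := by
  have hfold : u.foldl (fun acc c =>
      if PySem.Set.contains (PySem.Set.ofList pvDemographics) c then acc ++ [c] else acc) []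
      = u.filter (fun c => pvDemographics.contains c) := by
    have h := PySem.List.foldl_append_if
      (fun c => PySem.Set.contains (PySem.Set.ofList pvDemographics) c) (fun c => c) u ([] : List String)
    simp only [List.map_id'] at h
    rw [h]
    simp
  rw [hfold]
  congr 1
  apply List.filter_congr
  intro c hc
  simp [pysem, List.mem_filter, hc]

theorem seen_fold (l : List String) (s : List String) :
    l.foldl (fun (st : PySem.Set String × List String) c =>
        if PySem.Set.contains st.1 c then st else (PySem.Set.add st.1 c, st.2 ++ [c])) (s, s)
    = (l.foldl PySem.Set.add s, l.foldl PySem.Set.add s) := by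
  induction l generalizing s with
  | nil => rfl
  | cons c tl ih =>
    simp only [List.foldl_cons]
    rw [show (if PySem.Set.contains s c then (s, s)
          else (PySem.Set.add s c, (s : List String) ++ [c]))
        = ((PySem.Set.add s c : PySem.Set String), (PySem.Set.add s c : List String)) from by
      simp only [PySem.Set.add]; split_ifs <;> rfl]
    exact ih _

theorem dedup_fold (l : List String) :
    (l.foldl (fun (st : PySem.Set String × List String) c =>
        if PySem.Set.contains st.1 c then st else (PySem.Set.add st.1 c, st.2 ++ [c]))
      (PySem.Set.empty, [])).2 = PySem.List.dedup l := by
  rw [show ((PySem.Set.empty : PySem.Set String), ([] : List String))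
      = (([] : List String), ([] : List String)) from rfl]
  rw [seen_fold]
  rw [PySem.List.dedup_eq_ofList, PySem.Set.ofList_eq_foldl]

theorem dedup_append_singleton (xs : List String) (x : String) :
    PySem.List.dedup (xs ++ [x]) =
      if x ∈ PySem.List.dedup xs then PySem.List.dedup xs else PySem.List.dedup xs ++ [x] := by
  rw [PySem.List.dedup_eq_ofList, PySem.List.dedup_eq_ofList, PySem.Set.ofList_append_singleton]
  simp only [PySem.Set.add]
  split_ifs with h1 h2 h2 <;> first | rfl | (exfalso; simp [pysem] at *; simp_all)

theorem by_base_spec (sc : List String) :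
    (sc.foldl (fun d c =>
        PySem.Dict.insert d (pvBaseName c) (PySem.Dict.getD d (pvBaseName c) [] ++ [c]))
      PySem.Dict.empty).items
    = (PySem.List.dedup (sc.map pvBaseName)).map
        (fun b => (b, sc.filter (fun c => pvBaseName c == b))) := by
  induction sc using List.reverseRecOn with
  | nil => rfl
  | append_singleton tl c ih =>
    rw [List.foldl_append, List.foldl_cons, List.foldl_nil]
    set d := tl.foldl (fun d c =>
        PySem.Dict.insert d (pvBaseName c) (PySem.Dict.getD d (pvBaseName c) [] ++ [c]))
      PySem.Dict.empty with hd
    have hkeys : d.keys = PySem.List.dedup (tl.map pvBaseName) := by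
      show d.items.map Prod.fst = _
      rw [ih]; simp [Function.comp_def]
    have hnodup : d.keys.Nodup := by rw [hkeys]; exact PySem.List.nodup_dedup _
    have hcont : d.contains (pvBaseName c) = true ↔ pvBaseName c ∈ PySem.List.dedup (tl.map pvBaseName) := by
      rw [show d.contains (pvBaseName c) = d.items.any (fun p => p.1 == pvBaseName c) from by
        simp [PySem.Dict.contains]]
      rw [ih]; simp [List.any_eq_true]
    simp only [List.map_append, List.map_cons, List.map_nil]
    rw [dedup_append_singleton]
    by_cases hmem : pvBaseName c ∈ PySem.List.dedup (tl.map pvBaseName)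
    · -- existing base
      have hc : d.contains (pvBaseName c) = true := hcont.mpr hmem
      have hpair : ((pvBaseName c), tl.filter (fun x => pvBaseName x == pvBaseName c)) ∈ d.items := by
        rw [ih]; exact List.mem_map_of_mem hmem
      have hgetD : d.getD (pvBaseName c) [] = tl.filter (fun x => pvBaseName x == pvBaseName c) :=
        PySem.Dict.getD_of_mem_items d hpair hnodup []
      rw [PySem.Dict.items_insert_of_contains d _ hc, ih, hgetD]
      simp only [if_pos hmem, List.map_map]
      apply List.map_congr_left
      intro b hb
      by_cases hbc : b = pvBaseName c
      · subst hbc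
        simp [List.filter_append]
      · have : (b == pvBaseName c) = false := by simp [hbc]
        simp [Function.comp, this, List.filter_append, Ne.symm hbc]
    · have hc : d.contains (pvBaseName c) = false := by
        cases hcb : d.contains (pvBaseName c)
        · rfl
        · exact absurd (hcont.mp hcb) hmem
      rw [PySem.Dict.items_insert_of_not_contains d _ hc, ih,
        PySem.Dict.getD_of_not_contains d _ hc]
      simp only [if_neg hmem, List.map_append]
      congr 1
      · apply List.map_congr_left
        intro b hb
        have hbc : pvBaseName c ≠ b := by rintro rfl; exact hmem hb
        simp [List.filter_append, hbc]
      · simp [List.filter_append]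
        intro x hx hbx
        exact hmem (by rw [PySem.List.mem_dedup, ← hbx]; exact List.mem_map_of_mem hx)

theorem find?_congr_mem {α : Type} (l : List α) (p q : α → Bool)
    (h : ∀ x ∈ l, p x = q x) : l.find? p = l.find? q := by
  induction l with
  | nil => rfl
  | cons x tl ih =>
    simp only [List.find?_cons]
    rw [h x (by simp)]
    cases q x
    · exact ih (fun y hy => h y (by simp [hy]))
    · rfl

theorem pick_eq (want : String) (hw : want ∈ pvSummarySuffixes) (sc : List String) (b : String) :
    (if PySem.Set.contains (PySem.Set.ofList (sc.filter (fun c => pvBaseName c == b)))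
          (pvConcat b want) then [pvConcat b want]
     else
       match pvSummaryPrefFallback.find?
           (fun suf => PySem.Set.contains (PySem.Set.ofList (sc.filter (fun c => pvBaseName c == b)))
             (pvConcat b suf)) with
       | some suf => [pvConcat b suf]
       | none => [])
    = (pvPick b (want :: pvSummaryPrefFallback) (PySem.Set.ofList sc)).toList := by
  have hmem : ∀ s ∈ pvSummarySuffixes,
      PySem.Set.contains (PySem.Set.ofList (sc.filter (fun c => pvBaseName c == b))) (pvConcat b s)
      = PySem.Set.contains (PySem.Set.ofList sc) (pvConcat b s) := by
    intro s hs
    rw [Bool.eq_iff_iff]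
    simp only [pysem]
    simp [baseName_concat b s hs]
  have hfb : ∀ s ∈ pvSummaryPrefFallback, s ∈ pvSummarySuffixes := by decide
  unfold pvPick
  rw [List.find?_cons]
  rw [hmem want hw]
  cases hwant : PySem.Set.contains (PySem.Set.ofList sc) (pvConcat b want)
  · simp only []
    rw [find?_congr_mem _ _ _ (fun s hs => hmem s (hfb s hs))]
    cases pvSummaryPrefFallback.find?
        (fun suf => PySem.Set.contains (PySem.Set.ofList sc) (pvConcat b suf)) <;> simp
  · simp

-- ===== B-side round machinery =====

def chFcov (suf : String) (cs : List String) (cov : PySem.Set String) : PySem.Set String :=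
  match cs with
  | [] => cov
  | c :: tl =>
    if PySem.Str.endswith c suf then
      if PySem.Set.contains cov (pvSl suf c) then chFcov suf tl cov
      else chFcov suf tl (PySem.Set.add cov (pvSl suf c))
    else chFcov suf tl cov

def chF (suf : String) (cs : List String) (cov : PySem.Set String) : List String :=
  match cs with
  | [] => []
  | c :: tl =>
    if PySem.Str.endswith c suf then
      if PySem.Set.contains cov (pvSl suf c) then chF suf tl cov
      else c :: chF suf tl (PySem.Set.add cov (pvSl suf c))
    else chF suf tl cov

theorem round_fold (suf : String) (cs : List String) (cov : PySem.Set String) (ch : List String) :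
    cs.foldl
      (fun (st : PySem.Set String × List String) c =>
        if PySem.Str.endswith c suf then
          let base := PySem.Str.slice c none (some (-(PySem.Str.len suf : Int)))
          if PySem.Set.contains st.1 base then st
          else (PySem.Set.add st.1 base, st.2 ++ [c])
        else st) (cov, ch)
    = (chFcov suf cs cov, ch ++ chF suf cs cov) := by
  induction cs generalizing cov ch with
  | nil => simp [chFcov, chF]
  | cons c tl ih =>
    rw [List.foldl_cons]
    show List.foldl _
        (if PySem.Str.endswith c suf then
          if PySem.Set.contains cov (pvSl suf c) then (cov, ch)
          else (PySem.Set.add cov (pvSl suf c), ch ++ [c])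
        else (cov, ch)) tl = _
    simp only [chFcov, chF]
    split_ifs with h1 h2
    · exact ih cov ch
    · rw [ih (PySem.Set.add cov (pvSl suf c)) (ch ++ [c]), List.append_assoc]
      rfl
    · exact ih cov ch

theorem mem_chFcov (suf : String) (cs : List String) (cov : PySem.Set String) (x : String) :
    x ∈ chFcov suf cs cov
      ↔ x ∈ cov ∨ ∃ c ∈ cs, PySem.Str.endswith c suf = true ∧ pvSl suf c = x := by
  induction cs generalizing cov with
  | nil => simp [chFcov]
  | cons c tl ih =>
    simp only [chFcov]
    by_cases h1 : PySem.Str.endswith c suf = true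
    · by_cases h2 : PySem.Set.contains cov (pvSl suf c) = true
      · have hc : pvSl suf c ∈ cov := by simpa [pysem] using h2
        rw [if_pos h1, if_pos h2, ih]
        constructor
        · rintro (hx | ⟨c', hc', he, hsx⟩)
          · exact Or.inl hx
          · exact Or.inr ⟨c', by simp [hc'], he, hsx⟩
        · rintro (hx | ⟨c', hc', he, hsx⟩)
          · exact Or.inl hx
          · rcases List.mem_cons.mp hc' with rfl | hc'
            · exact Or.inl (hsx ▸ hc)
            · exact Or.inr ⟨c', hc', he, hsx⟩
      · rw [if_pos h1, if_neg h2, ih]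
        have hadd : ∀ y, y ∈ PySem.Set.add cov (pvSl suf c) ↔ y ∈ cov ∨ y = pvSl suf c := by
          intro y; simp [pysem]
        rw [hadd]
        constructor
        · rintro ((hx | rfl) | ⟨c', hc', he, hsx⟩)
          · exact Or.inl hx
          · exact Or.inr ⟨c, by simp, h1, rfl⟩
          · exact Or.inr ⟨c', by simp [hc'], he, hsx⟩
        · rintro (hx | ⟨c', hc', he, hsx⟩)
          · exact Or.inl (Or.inl hx)
          · rcases List.mem_cons.mp hc' with rfl | hc'
            · exact Or.inl (Or.inr hsx.symm)
            · exact Or.inr ⟨c', hc', he, hsx⟩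
    · rw [if_neg h1, ih]
      have h1' : PySem.Str.endswith c suf = false := Bool.not_eq_true _ ▸ (by simpa using h1)
      constructor
      · rintro (hx | ⟨c', hc', he, hsx⟩)
        · exact Or.inl hx
        · exact Or.inr ⟨c', by simp [hc'], he, hsx⟩
      · rintro (hx | ⟨c', hc', he, hsx⟩)
        · exact Or.inl hx
        · rcases List.mem_cons.mp hc' with rfl | hc'
          · rw [h1'] at he; exact absurd he (by simp)
          · exact Or.inr ⟨c', hc', he, hsx⟩

theorem mem_chF (suf : String) (hs : suf ∈ pvSummarySuffixes)
    (cs : List String) (cov : PySem.Set String) (x : String) :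
    x ∈ chF suf cs cov
      ↔ x ∈ cs ∧ PySem.Str.endswith x suf = true ∧ pvSl suf x ∉ cov := by
  have hlen := suffix_len_pos suf hs
  induction cs generalizing cov with
  | nil => simp [chF]
  | cons c tl ih =>
    simp only [chF]
    by_cases h1 : PySem.Str.endswith c suf = true
    · by_cases h2 : PySem.Set.contains cov (pvSl suf c) = true
      · have hc : pvSl suf c ∈ cov := by simpa [pysem] using h2
        rw [if_pos h1, if_pos h2]
        constructor
        · intro hx
          obtain ⟨hx', he, hnc⟩ := (ih cov).mp hx
          exact ⟨by simp [hx'], he, hnc⟩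
        · rintro ⟨hx, he, hnc⟩
          rcases List.mem_cons.mp hx with rfl | hx
          · exact absurd hc hnc
          · exact (ih cov).mpr ⟨hx, he, hnc⟩
      · rw [if_pos h1, if_neg h2]
        have h2' : pvSl suf c ∉ cov := by simpa [pysem] using h2
        have hadd : ∀ y, y ∈ PySem.Set.add cov (pvSl suf c) ↔ y ∈ cov ∨ y = pvSl suf c := by
          intro y; simp [pysem]
        constructor
        · intro hx
          rcases List.mem_cons.mp hx with rfl | hx
          · exact ⟨by simp, h1, h2'⟩
          · obtain ⟨hx', he, hnc⟩ := (ih _).mp hx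
            rw [hadd] at hnc
            exact ⟨by simp [hx'], he, fun hm => hnc (Or.inl hm)⟩
        · rintro ⟨hx, he, hnc⟩
          rcases List.mem_cons.mp hx with rfl | hx
          · exact List.mem_cons_self ..
          · by_cases hxc : x = c
            · subst hxc; exact List.mem_cons_self ..
            · refine List.mem_cons_of_mem _ ((ih _).mpr ⟨hx, he, ?_⟩)
              rw [hadd]
              rintro (hm | hm)
              · exact hnc hm
              · apply hxc
                calc x = pvConcat (pvSl suf x) suf := (concat_sl x suf hlen he).symm
                  _ = pvConcat (pvSl suf c) suf := by rw [hm]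
                  _ = c := concat_sl c suf hlen h1
    · rw [if_neg h1]
      have h1' : PySem.Str.endswith c suf = false := Bool.not_eq_true _ ▸ (by simpa using h1)
      constructor
      · intro hx
        obtain ⟨hx', he, hnc⟩ := (ih cov).mp hx
        exact ⟨by simp [hx'], he, hnc⟩
      · rintro ⟨hx, he, hnc⟩
        rcases List.mem_cons.mp hx with rfl | hx
        · rw [h1'] at he; exact absurd he (by simp)
        · exact (ih cov).mpr ⟨hx, he, hnc⟩

theorem nodup_chF (suf : String) (hs : suf ∈ pvSummarySuffixes)
    (cs : List String) (cov : PySem.Set String) : (chF suf cs cov).Nodup := by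
  induction cs generalizing cov with
  | nil => simp [chF]
  | cons c tl ih =>
    simp only [chF]
    by_cases h1 : PySem.Str.endswith c suf = true
    · by_cases h2 : PySem.Set.contains cov (pvSl suf c) = true
      · rw [if_pos h1, if_pos h2]; exact ih cov
      · rw [if_pos h1, if_neg h2]
        refine List.nodup_cons.mpr ⟨?_, ih _⟩
        intro hmem
        obtain ⟨-, -, hnc⟩ := (mem_chF suf hs tl _ c).mp hmem
        exact hnc (by simp [pysem])
    · rw [if_neg h1]
      exact ih cov

def loopF (sc : List String) (prefs : List String) (cov : PySem.Set String) : List String :=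
  match prefs with
  | [] => []
  | s :: r => chF s sc cov ++ loopF sc r (chFcov s sc cov)

theorem loop_fold (sc : List String) (prefs : List String) (cov : PySem.Set String) (ch : List String) :
    (prefs.foldl
      (fun (st : PySem.Set String × List String) suf =>
        sc.foldl
          (fun (st : PySem.Set String × List String) c =>
            if PySem.Str.endswith c suf then
              let base := PySem.Str.slice c none (some (-(PySem.Str.len suf : Int)))
              if PySem.Set.contains st.1 base then st
              else (PySem.Set.add st.1 base, st.2 ++ [c])
            else st) st) (cov, ch)).2
    = ch ++ loopF sc prefs cov := by
  induction prefs generalizing cov ch with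
  | nil => simp [loopF]
  | cons s r ih =>
    rw [List.foldl_cons]
    show (List.foldl _ (sc.foldl _ (cov, ch)) r).2 = _
    rw [round_fold s sc cov ch, ih, loopF, List.append_assoc]

theorem pick_nil (b : String) (pool : PySem.Set String) : pvPick b [] pool = none := by
  simp [pvPick]

theorem pick_cons (b s : String) (r : List String) (pool : PySem.Set String) :
    pvPick b (s :: r) pool
      = if PySem.Set.contains pool (pvConcat b s) then some (pvConcat b s) else pvPick b r pool := by
  unfold pvPick
  rw [List.find?_cons]
  cases h : PySem.Set.contains pool (pvConcat b s) <;> simp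

theorem chF_perm (s : String) (hs : s ∈ pvSummarySuffixes) (sc : List String) (cov : PySem.Set String) :
    (chF s sc cov).Perm
      ((((PySem.List.dedup (sc.map pvBaseOf)).filter (fun b => !(PySem.Set.contains cov b))).filter
          (fun b => PySem.Set.contains (PySem.Set.ofList sc) (pvConcat b s))).map (fun b => pvConcat b s)) := by
  have hlen := suffix_len_pos s hs
  apply (List.perm_ext_iff_of_nodup (nodup_chF s hs sc cov) ?_).mpr
  · intro x
    rw [mem_chF s hs sc cov x]
    simp only [List.mem_map, List.mem_filter, PySem.List.mem_dedup]
    constructor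
    · rintro ⟨hx, he, hnc⟩
      refine ⟨pvSl s x, ⟨⟨⟨x, hx, baseOf_of_endswith x s hs he⟩, ?_⟩, ?_⟩, concat_sl x s hlen he⟩
      · simpa [pysem] using hnc
      · rw [concat_sl x s hlen he]
        simpa [pysem] using hx
    · rintro ⟨b, ⟨⟨hb, hnc⟩, hp⟩, rfl⟩
      refine ⟨by simpa [pysem] using hp, endswith_concat b s, ?_⟩
      rw [slice_concat b s hlen]
      simpa [pysem] using hnc
  · apply List.Nodup.map_on
    · intro b1 h1 b2 h2 heq
      have := slice_concat b1 s hlen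
      rw [heq, slice_concat b2 s hlen] at this
      exact this.symm
    · exact ((PySem.List.nodup_dedup _).filter _).filter _

theorem covF_filter (s : String) (hs : s ∈ pvSummarySuffixes) (sc : List String)
    (cov : PySem.Set String) (b : String) :
    (PySem.Set.contains (chFcov s sc cov) b)
      = (PySem.Set.contains cov b || PySem.Set.contains (PySem.Set.ofList sc) (pvConcat b s)) := by
  have hlen := suffix_len_pos s hs
  rw [Bool.eq_iff_iff]
  constructor
  · intro h
    have := (mem_chFcov s sc cov b).mp (by simpa [pysem] using h)
    rcases this with hc | ⟨c, hc, he, hsl⟩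
    · simp [pysem, hc]
    · have hcb : pvConcat b s = c := by rw [← hsl]; exact concat_sl c s hlen he
      simp only [Bool.or_eq_true]
      right
      simp [pysem, hcb, hc]
  · intro h
    rcases Bool.or_eq_true_iff.mp h with hc | hp
    · have : b ∈ cov := by simpa [pysem] using hc
      simpa [pysem] using (mem_chFcov s sc cov b).mpr (Or.inl this)
    · have hmem : pvConcat b s ∈ sc := by simpa [pysem] using hp
      have : b ∈ chFcov s sc cov :=
        (mem_chFcov s sc cov b).mpr
          (Or.inr ⟨pvConcat b s, hmem, endswith_concat b s, slice_concat b s hlen⟩)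
      simpa [pysem] using this

theorem loopF_perm (sc : List String) (prefs : List String)
    (hp : ∀ s ∈ prefs, s ∈ pvSummarySuffixes) (cov : PySem.Set String) :
    (loopF sc prefs cov).Perm
      (((PySem.List.dedup (sc.map pvBaseOf)).filter (fun b => !(PySem.Set.contains cov b))).filterMap
        (fun b => pvPick b prefs (PySem.Set.ofList sc))) := by
  induction prefs generalizing cov with
  | nil => simp [loopF, pick_nil]
  | cons s r ih =>
    have hs : s ∈ pvSummarySuffixes := hp s (by simp)
    have hr : ∀ s' ∈ r, s' ∈ pvSummarySuffixes := fun s' h' => hp s' (by simp [h'])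
    have hq : ∀ b ∈ ((PySem.List.dedup (sc.map pvBaseOf)).filter (fun b => !(PySem.Set.contains cov b))).filter
          (fun b => PySem.Set.contains (PySem.Set.ofList sc) (pvConcat b s)),
        pvPick b (s :: r) (PySem.Set.ofList sc) = some (pvConcat b s) := by
      intro b hb
      rw [pick_cons, if_pos (List.mem_filter.mp hb).2]
    have hnq : ∀ b ∈ ((PySem.List.dedup (sc.map pvBaseOf)).filter (fun b => !(PySem.Set.contains cov b))).filter
          (fun b => !(PySem.Set.contains (PySem.Set.ofList sc) (pvConcat b s))),
        pvPick b (s :: r) (PySem.Set.ofList sc) = pvPick b r (PySem.Set.ofList sc) := by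
      intro b hb
      rw [pick_cons, if_neg]
      have h := (List.mem_filter.mp hb).2
      simp only [Bool.not_eq_true'] at h
      intro hc
      rw [h] at hc
      exact Bool.false_ne_true hc
    have hcov : (PySem.List.dedup (sc.map pvBaseOf)).filter (fun b => !(PySem.Set.contains (chFcov s sc cov) b))
        = ((PySem.List.dedup (sc.map pvBaseOf)).filter (fun b => !(PySem.Set.contains cov b))).filter
            (fun b => !(PySem.Set.contains (PySem.Set.ofList sc) (pvConcat b s))) := by
      rw [List.filter_filter]
      apply List.filter_congr
      intro b hb
      rw [covF_filter s hs sc cov b, Bool.not_or]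
      exact Bool.and_comm _ _
    have hsplit := List.filter_append_perm (fun b => PySem.Set.contains (PySem.Set.ofList sc) (pvConcat b s))
      ((PySem.List.dedup (sc.map pvBaseOf)).filter (fun b => !(PySem.Set.contains cov b)))
    have hstep : ((((PySem.List.dedup (sc.map pvBaseOf)).filter (fun b => !(PySem.Set.contains cov b))).filter
            (fun b => PySem.Set.contains (PySem.Set.ofList sc) (pvConcat b s)))
          ++ (((PySem.List.dedup (sc.map pvBaseOf)).filter (fun b => !(PySem.Set.contains cov b))).filter
            (fun b => !(PySem.Set.contains (PySem.Set.ofList sc) (pvConcat b s))))).filterMap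
          (fun b => pvPick b (s :: r) (PySem.Set.ofList sc))
        = ((((PySem.List.dedup (sc.map pvBaseOf)).filter (fun b => !(PySem.Set.contains cov b))).filter
            (fun b => PySem.Set.contains (PySem.Set.ofList sc) (pvConcat b s))).map (fun b => pvConcat b s))
          ++ ((((PySem.List.dedup (sc.map pvBaseOf)).filter (fun b => !(PySem.Set.contains cov b))).filter
            (fun b => !(PySem.Set.contains (PySem.Set.ofList sc) (pvConcat b s)))).filterMap
              (fun b => pvPick b r (PySem.Set.ofList sc))) := by
      rw [List.filterMap_append, List.filterMap_congr hq, List.filterMap_congr hnq,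
        show (fun b => some (pvConcat b s)) = some ∘ (fun b => pvConcat b s) from rfl,
        List.filterMap_eq_map]
    have h3 := List.Perm.filterMap (fun b => pvPick b (s :: r) (PySem.Set.ofList sc)) hsplit
    rw [hstep] at h3
    exact List.Perm.trans
      (List.Perm.append (chF_perm s hs sc cov) (hcov ▸ ih hr (chFcov s sc cov))) h3

-- A's chosen list equals the per-base filterMap
theorem a_chosen_eq (want : String) (hw : want ∈ pvSummarySuffixes) (sc : List String) :
    ((PySem.Dict.items (sc.foldl
        (fun d c => PySem.Dict.insert d (pvBaseName c) (PySem.Dict.getD d (pvBaseName c) [] ++ [c]))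
        PySem.Dict.empty)).foldl
      (fun acc p =>
        let cols_set := PySem.Set.ofList p.2
        if PySem.Set.contains cols_set (pvConcat p.1 want) then acc ++ [pvConcat p.1 want]
        else
          match pvSummaryPrefFallback.find? (fun suf => PySem.Set.contains cols_set (pvConcat p.1 suf)) with
          | some suf => acc ++ [pvConcat p.1 suf]
          | none => acc) [])
    = (PySem.List.dedup (sc.map pvBaseOf)).filterMap
        (fun b => pvPick b (want :: pvSummaryPrefFallback) (PySem.Set.ofList sc)) := by
  rw [by_base_spec sc, List.foldl_map]
  have hbody : (fun (acc : List String) (b : String) =>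
      (fun acc (p : String × List String) =>
        let cols_set := PySem.Set.ofList p.2
        if PySem.Set.contains cols_set (pvConcat p.1 want) then acc ++ [pvConcat p.1 want]
        else
          match pvSummaryPrefFallback.find?
              (fun suf => PySem.Set.contains cols_set (pvConcat p.1 suf)) with
          | some suf => acc ++ [pvConcat p.1 suf]
          | none => acc) acc (b, sc.filter (fun c => pvBaseName c == b)))
      = (fun acc b => acc ++
          (if PySem.Set.contains (PySem.Set.ofList (sc.filter (fun c => pvBaseName c == b)))
              (pvConcat b want) then [pvConcat b want]
           else
             match pvSummaryPrefFallback.find?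
                 (fun suf => PySem.Set.contains (PySem.Set.ofList (sc.filter (fun c => pvBaseName c == b)))
                   (pvConcat b suf)) with
             | some suf => [pvConcat b suf]
             | none => [])) := by
    funext acc b
    dsimp only
    split
    · rfl
    · cases pvSummaryPrefFallback.find?
          (fun suf => PySem.Set.contains (PySem.Set.ofList (sc.filter (fun c => pvBaseName c == b)))
            (pvConcat b suf)) <;> simp
  rw [hbody, PySem.List.foldl_append_eq_flatMap]
  rw [show (fun b => (if PySem.Set.contains (PySem.Set.ofList (sc.filter (fun c => pvBaseName c == b)))
              (pvConcat b want) then [pvConcat b want]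
           else
             match pvSummaryPrefFallback.find?
                 (fun suf => PySem.Set.contains (PySem.Set.ofList (sc.filter (fun c => pvBaseName c == b)))
                   (pvConcat b suf)) with
             | some suf => [pvConcat b suf]
             | none => []))
      = (fun b => (pvPick b (want :: pvSummaryPrefFallback) (PySem.Set.ofList sc)).toList) from
    funext (pick_eq want hw sc)]
  rw [← List.filterMap_eq_flatMap_toList]
  rw [show pvBaseName = pvBaseOf from funext pvBaseName_eq_baseOf, List.nil_append]

-- ===== VERDICT (by name: the statement is the Claim_ definition above) =====
set_option maxHeartbeats 1000000 in
theorem build_selected_columns_spec : Claim_equal_build_selected_columns := by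
  intro cc summary k d _
  unfold Spec_build_selected_columns build_selected_columns build_selected_columns_alt
  dsimp only
  rw [dedup_fold]
  set want := PySem.Dict.getD (PySem.Dict.ofList
      [("median", "_(Median)"), ("mean", "_(Mean)"), ("min", "_(Min)"), ("max", "_(Max)")])
      (PySem.Str.lower (PySem.Str.strip summary)) "_(Median)" with hwant
  set common := cc.filter (fun c => !(PySem.Set.contains pvExcludeLike c)) with hcommon
  have hplain : common.filter (fun c => !(pvSummarySuffixes.any (fun s => PySem.Str.endswith c s)))
      = common.filter (fun c => !(pvIsSummaryCol c)) := by
    simp [pvIsSummaryCol]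
  have hsumm : common.filter (fun c => pvSummarySuffixes.any (fun s => PySem.Str.endswith c s))
      = common.filter (fun c => pvIsSummaryCol c) := by
    simp [pvIsSummaryCol]
  rw [hplain, hsumm]
  set u := common.filter (fun c => !(pvIsSummaryCol c)) with hu
  set sc := common.filter (fun c => pvIsSummaryCol c) with hsc
  have hfront : (if d = true then
        (u.foldl (fun acc c =>
            if PySem.Set.contains (PySem.Set.ofList pvDemographics) c then acc ++ [c] else acc) [])
          ++ u.filter (fun c => !(PySem.Set.contains (PySem.Set.ofList
                (u.foldl (fun acc c =>
                  if PySem.Set.contains (PySem.Set.ofList pvDemographics) c then acc ++ [c] else acc) [])) c))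
      else u)
      = (if d = true then
          u.filter (fun c => pvDemographics.contains c)
            ++ u.filter (fun c => !(pvDemographics.contains c))
        else u) := by
    cases d
    · rfl
    · exact front_eq u
  rw [hfront]
  refine congrArg PySem.List.dedup (congrArg₂ (· ++ ·) rfl ?_)
  cases k
  · simp only [Bool.false_eq_true, if_false]
    rw [loop_fold sc (want :: pvSummaryPrefFallback) PySem.Set.empty [], List.nil_append]
    rw [a_chosen_eq want (want_mem _) sc]
    have hpref : ∀ s ∈ (want :: pvSummaryPrefFallback), s ∈ pvSummarySuffixes := by
      intro s hsm
      rcases List.mem_cons.mp hsm with rfl | hsm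
      · exact want_mem _
      · have hall : ∀ x ∈ pvSummaryPrefFallback, x ∈ pvSummarySuffixes := by decide
        exact hall s hsm
    have hperm := loopF_perm sc (want :: pvSummaryPrefFallback) hpref PySem.Set.empty
    have hfilt : (PySem.List.dedup (sc.map pvBaseOf)).filter
        (fun b => !(PySem.Set.contains PySem.Set.empty b)) = PySem.List.dedup (sc.map pvBaseOf) := by
      simp [pysem, PySem.Set.empty]
    rw [hfilt] at hperm
    exact PySem.List.sorted_eq_sorted_of_perm _ _ (fun x => x) (fun _ _ h => h) hperm.symm
  · rfl
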